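-- pv_equiv track=rewrite | github.com/pardhusnc2004/pushncode_ | 2024/October/22/GeeksforGeeks_22-10.py | sameOccurrence
-- ===== SOURCE A (Python) =====
-- from collections import defaultdict
--
-- def sameOccurrence(arr, x, y):
--     # code here
--     d = defaultdict(int)
--     d[0] = 1
--     res = 0
--     xCnt, yCnt = 0, 0
--     for i in arr:
--         if i == x:
--             xCnt += 1
--         if i == y:
--             yCnt += 1
--         diff = xCnt - yCnt
--         res += d[diff]
--         d[diff] += 1
--     return res
-- ===== SOURCE B (Python) =====
-- def sameOccurrence(arr, x, y):
--     # Direct enumeration: for each suffix, count its balanced prefixes. O(n^2), no hashmap.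
--     res = 0
--     suffix = arr
--     while suffix:
--         xc, yc = 0, 0
--         for v in suffix:
--             if v == x:
--                 xc += 1
--             if v == y:
--                 yc += 1
--             if xc == yc:
--                 res += 1
--         suffix = suffix[1:]
--     return res
-- ===== Notes on version B (the rewrite author's own statement) =====
-- stated objective: alternative
-- what changed: Replaced the prefix-difference hashmap counting with direct enumeration of all subarrays: for each start position, an inner scan maintains independent x/y counters and counts the balanced subarrays.
import Mathlib
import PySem

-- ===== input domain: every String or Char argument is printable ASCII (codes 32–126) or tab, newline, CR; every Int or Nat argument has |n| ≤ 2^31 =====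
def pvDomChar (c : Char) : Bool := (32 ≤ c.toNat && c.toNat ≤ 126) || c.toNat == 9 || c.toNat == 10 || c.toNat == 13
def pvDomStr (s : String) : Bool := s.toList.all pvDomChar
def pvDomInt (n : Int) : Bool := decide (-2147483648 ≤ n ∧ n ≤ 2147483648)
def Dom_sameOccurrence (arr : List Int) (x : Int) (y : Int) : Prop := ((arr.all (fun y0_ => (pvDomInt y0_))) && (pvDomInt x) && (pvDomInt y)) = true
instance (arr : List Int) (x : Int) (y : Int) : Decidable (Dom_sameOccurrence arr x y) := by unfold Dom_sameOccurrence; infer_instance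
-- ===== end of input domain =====

-- B replaces A's prefix-difference hashmap with direct enumeration of all subarrays (alternative decomposition, not faster).


-- ===== PORT A =====
-- one iteration of A's for-loop; state = (d, res, xCnt, yCnt).
-- defaultdict read d[diff] ported as getD with default 0; d[diff] += 1 as modify with default 0
def pvStepA (x : Int) (y : Int) (s : PySem.Dict Int Int × Int × Int × Int) (i : Int) :
    PySem.Dict Int Int × Int × Int × Int :=
  let d := s.1
  let res := s.2.1
  let xCnt := if i = x then s.2.2.1 + 1 else s.2.2.1
  let yCnt := if i = y then s.2.2.2 + 1 else s.2.2.2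
  let diff := xCnt - yCnt
  let res := res + d.getD diff 0
  let d := d.modify diff 0 (· + 1)
  (d, res, xCnt, yCnt)

def sameOccurrence (arr : List Int) (x : Int) (y : Int) : Int :=
  let d : PySem.Dict Int Int := (PySem.Dict.empty).insert 0 1
  (arr.foldl (pvStepA x y) (d, 0, 0, 0)).2.1

-- ===== PORT B =====
-- one iteration of Source B's inner for-loop; state = (xc, yc, res)
def pvStepB (x : Int) (y : Int) (s : Int × Int × Int) (v : Int) : Int × Int × Int :=
  let xc := if v = x then s.1 + 1 else s.1
  let yc := if v = y then s.2.1 + 1 else s.2.1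
  (xc, yc, if xc = yc then s.2.2 + 1 else s.2.2)

-- inner for-loop of Source B: scan one suffix, counting balanced prefixes
def pvInnerB (x : Int) (y : Int) (l : List Int) : Int :=
  (l.foldl (pvStepB x y) (0, 0, 0)).2.2

-- outer while-loop of Source B: walk down the suffixes
def pvOuterB (x : Int) (y : Int) : List Int → Int
  | [] => 0
  | a :: t => pvInnerB x y (a :: t) + pvOuterB x y t

def sameOccurrence_alt (arr : List Int) (x : Int) (y : Int) : Int :=
  pvOuterB x y arr

-- ===== PRECONDITION & SPEC =====
def Spec_sameOccurrence (arr : List Int) (x : Int) (y : Int) (out : Int) : Prop := out = sameOccurrence_alt arr x y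
instance (arr : List Int) (x : Int) (y : Int) (out : Int) : Decidable (Spec_sameOccurrence arr x y out) := by unfold Spec_sameOccurrence; infer_instance

-- ===== CLAIM (what is proved, stated in full; the proofs are below) =====
def Claim_equal_sameOccurrence : Prop := ∀ (arr : List Int) (x : Int) (y : Int), Dom_sameOccurrence arr x y → Spec_sameOccurrence arr x y (sameOccurrence arr x y)

-- ===== LEMMAS AND PROOFS =====

-- the per-element contribution to xCnt - yCnt
def pvStp (x y a : Int) : Int := (if a = x then 1 else 0) - (if a = y then 1 else 0)

-- list of running differences after each element, starting from acc
def pvDiffs (x y : Int) (acc : Int) : List Int → List Int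
  | [] => []
  | a :: t => (acc + pvStp x y a) :: pvDiffs x y (acc + pvStp x y a) t

-- number of equal pairs (p < q) in a list, grouped by the first coordinate
def pvPairs : List Int → Int
  | [] => 0
  | h :: t => (t.count h : Int) + pvPairs t

theorem pvStp_eq (x y i xCnt yCnt : Int) :
    (if i = x then xCnt + 1 else xCnt) - (if i = y then yCnt + 1 else yCnt)
      = (xCnt - yCnt) + pvStp x y i := by
  unfold pvStp; split_ifs <;> ring

theorem pvStepA_def (x y : Int) (d : PySem.Dict Int Int) (res xCnt yCnt i : Int) :
    pvStepA x y (d, res, xCnt, yCnt) i =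
      (d.modify ((xCnt - yCnt) + pvStp x y i) 0 (· + 1),
       res + d.getD ((xCnt - yCnt) + pvStp x y i) 0,
       (if i = x then xCnt + 1 else xCnt), (if i = y then yCnt + 1 else yCnt)) := by
  simp only [pvStepA, pvStp_eq]

theorem pvStepB_def (x y : Int) (xc yc res v : Int) :
    pvStepB x y (xc, yc, res) v =
      ((if v = x then xc + 1 else xc), (if v = y then yc + 1 else yc),
       if (xc - yc) + pvStp x y v = 0 then res + 1 else res) := by
  simp only [pvStepB]
  have h := pvStp_eq x y v xc yc
  by_cases hc : (if v = x then xc + 1 else xc) = (if v = y then yc + 1 else yc) <;>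
    by_cases h0 : (xc - yc) + pvStp x y v = 0 <;> simp [hc, h0] <;> omega

theorem pvPairs_append_singleton (L : List Int) (v : Int) :
    pvPairs (L ++ [v]) = pvPairs L + (L.count v : Int) := by
  induction L with
  | nil => simp [pvPairs]
  | cons h t ih =>
    simp only [List.cons_append, pvPairs, ih, List.count_append, List.count_cons]
    push_cast
    by_cases hv : v = h
    · subst hv; simp
      ring
    · simp [hv, Ne.symm hv]
      ring

theorem pvDiffs_shift (x y : Int) (l : List Int) : ∀ (acc c : Int),
    pvDiffs x y (c + acc) l = (pvDiffs x y acc l).map (c + ·) := by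
  induction l with
  | nil => intro acc c; simp [pvDiffs]
  | cons a t ih =>
    intro acc c
    simp only [pvDiffs, List.map_cons, List.cons.injEq]
    constructor
    · ring
    · rw [show c + acc + pvStp x y a = c + (acc + pvStp x y a) by ring, ih]

theorem pvPairs_map_add (c : Int) (L : List Int) :
    pvPairs (L.map (c + ·)) = pvPairs L := by
  induction L with
  | nil => rfl
  | cons h t ih =>
    simp only [List.map_cons, pvPairs, ih]
    congr 1
    norm_cast
    exact List.count_map_of_injective t (c + ·) (add_right_injective c) h

theorem pvFoldA (x y : Int) (l : List Int) :
    ∀ (d : PySem.Dict Int Int) (res xCnt yCnt : Int) (pref : List Int),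
    (∀ v, d.getD v 0 = (pref.count v : Int)) →
    (l.foldl (pvStepA x y) (d, res, xCnt, yCnt)).2.1 + pvPairs pref
      = res + pvPairs (pref ++ pvDiffs x y (xCnt - yCnt) l) := by
  induction l with
  | nil => intro d res xCnt yCnt pref _; simp [pvDiffs]
  | cons a t ih =>
    intro d res xCnt yCnt pref hd
    rw [List.foldl_cons, pvStepA_def]
    have hd' : ∀ v, (d.modify ((xCnt - yCnt) + pvStp x y a) 0 (· + 1)).getD v 0
        = ((pref ++ [(xCnt - yCnt) + pvStp x y a]).count v : Int) := by
      intro v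
      rw [PySem.Dict.getD_modify, List.count_append]
      by_cases hv : v = (xCnt - yCnt) + pvStp x y a
      · subst hv; rw [hd]; simp
      · rw [if_neg hv, hd]
        have hc : List.count v [(xCnt - yCnt) + pvStp x y a] = 0 := by
          rw [List.count_eq_zero]; simpa using hv
        rw [hc]; simp
    have hih := ih (d.modify ((xCnt - yCnt) + pvStp x y a) 0 (· + 1))
      (res + d.getD ((xCnt - yCnt) + pvStp x y a) 0)
      (if a = x then xCnt + 1 else xCnt) (if a = y then yCnt + 1 else yCnt)
      (pref ++ [(xCnt - yCnt) + pvStp x y a]) hd'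
    rw [pvStp_eq, pvPairs_append_singleton] at hih
    rw [hd] at hih ⊢
    simp only [pvDiffs]
    rw [show pref ++ ((xCnt - yCnt) + pvStp x y a) :: pvDiffs x y ((xCnt - yCnt) + pvStp x y a) t
        = (pref ++ [(xCnt - yCnt) + pvStp x y a]) ++ pvDiffs x y ((xCnt - yCnt) + pvStp x y a) t by simp]
    omega

theorem pvFoldB (x y : Int) (l : List Int) :
    ∀ (xc yc res : Int),
    (l.foldl (pvStepB x y) (xc, yc, res)).2.2
      = res + ((pvDiffs x y (xc - yc) l).count 0 : Int) := by
  induction l with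
  | nil => intro xc yc res; simp [pvDiffs]
  | cons a t ih =>
    intro xc yc res
    rw [List.foldl_cons, pvStepB_def, ih, pvStp_eq]
    simp only [pvDiffs, List.count_cons]
    by_cases h0 : (xc - yc) + pvStp x y a = 0
    · simp [h0]
      ring
    · simp [h0]

theorem pvInnerB_eq (x y : Int) (l : List Int) :
    pvInnerB x y l = ((pvDiffs x y 0 l).count 0 : Int) := by
  have h := pvFoldB x y l 0 0 0
  simpa [pvInnerB] using h

theorem pvOuterB_eq (x y : Int) (l : List Int) :
    pvOuterB x y l = pvPairs (0 :: pvDiffs x y 0 l) := by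
  induction l with
  | nil => simp [pvOuterB, pvDiffs, pvPairs]
  | cons a t ih =>
    simp only [pvOuterB, pvInnerB_eq, ih]
    conv_rhs => rw [pvPairs]
    congr 1
    show pvPairs (0 :: pvDiffs x y 0 t) = pvPairs (pvDiffs x y 0 (a :: t))
    simp only [pvDiffs]
    have hsh : pvDiffs x y (0 + pvStp x y a) t
        = (pvDiffs x y 0 t).map ((0 + pvStp x y a) + ·) := by
      rw [show (0 + pvStp x y a : Int) = (0 + pvStp x y a) + 0 by ring]
      rw [pvDiffs_shift]
      ring_nf
    rw [hsh]
    rw [show ((0 + pvStp x y a) :: (pvDiffs x y 0 t).map ((0 + pvStp x y a) + ·) : List Int)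
        = ((0 :: pvDiffs x y 0 t).map ((0 + pvStp x y a) + ·)) by simp]
    rw [pvPairs_map_add]

-- ===== VERDICT (by name: the statement is the Claim_ definition above) =====
theorem sameOccurrence_spec : Claim_equal_sameOccurrence := by
  intro arr x y _
  unfold Spec_sameOccurrence sameOccurrence sameOccurrence_alt
  show (List.foldl (pvStepA x y) ((PySem.Dict.empty : PySem.Dict Int Int).insert 0 1, 0, 0, 0) arr).2.1
    = pvOuterB x y arr
  have hd : ∀ v, ((PySem.Dict.empty : PySem.Dict Int Int).insert 0 1).getD v 0
      = (([0] : List Int).count v : Int) := by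
    intro v
    rw [PySem.Dict.getD_insert]
    by_cases hv : v = 0
    · simp [hv]
    · rw [if_neg hv]
      have hc : List.count v [(0 : Int)] = 0 := by rw [List.count_eq_zero]; simpa using hv
      simp [hc]
  have hA := pvFoldA x y arr ((PySem.Dict.empty : PySem.Dict Int Int).insert 0 1) 0 0 0 [0] hd
  rw [show (0 : Int) - 0 = 0 by ring] at hA
  rw [pvOuterB_eq]
  rw [show ([0] ++ pvDiffs x y 0 arr : List Int) = 0 :: pvDiffs x y 0 arr by simp] at hA
  have h0 : pvPairs [0] = 0 := by simp [pvPairs]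
  rw [h0] at hA
  omega
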